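-- pv_equiv track=rewrite | github.com/yizhoupan3-debug/skill | scripts/evolution_server.py | build_account_id
-- ===== SOURCE A (Python) =====
-- from typing import Any, Literal
--
-- def build_account_id(raw_account: dict[str, Any], fallback_name: str) -> str:
--     """Build a stable account identifier.
--
--     Parameters:
--         raw_account: Raw account config entry.
--         fallback_name: Name fallback for slug generation.
--
--     Returns:
--         str: Stable account identifier.
--     """
--
--     explicit = str(raw_account.get("id", "")).strip()
--     if explicit:
--         return explicit
--     seed = fallback_name.strip().lower() or "sub-account"
--     allowed = [char if char.isalnum() else "-" for char in seed]
--     collapsed = "".join(allowed)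
--     while "--" in collapsed:
--         collapsed = collapsed.replace("--", "-")
--     return collapsed.strip("-") or "sub-account"
-- ===== SOURCE B (Python) =====
-- from itertools import groupby
--
--
-- def build_account_id(raw_account: dict, fallback_name: str) -> str:
--     explicit = str(raw_account.get("id", "")).strip()
--     if explicit:
--         return explicit
--     seed = fallback_name.strip().lower() or "sub-account"
--     slug = "-".join("".join(run) for alnum, run in groupby(seed, str.isalnum) if alnum)
--     return slug or "sub-account"
-- ===== Notes on version B (the rewrite author's own statement) =====
-- stated objective: idiomatic
-- what changed: Instead of mapping each char to dash-or-self, collapsing '--' in a while loop of full-string replaces and stripping dashes, B tokenizes the seed into maximal alnum runs with itertools.groupby and joins them with '-'.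
import Mathlib
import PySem

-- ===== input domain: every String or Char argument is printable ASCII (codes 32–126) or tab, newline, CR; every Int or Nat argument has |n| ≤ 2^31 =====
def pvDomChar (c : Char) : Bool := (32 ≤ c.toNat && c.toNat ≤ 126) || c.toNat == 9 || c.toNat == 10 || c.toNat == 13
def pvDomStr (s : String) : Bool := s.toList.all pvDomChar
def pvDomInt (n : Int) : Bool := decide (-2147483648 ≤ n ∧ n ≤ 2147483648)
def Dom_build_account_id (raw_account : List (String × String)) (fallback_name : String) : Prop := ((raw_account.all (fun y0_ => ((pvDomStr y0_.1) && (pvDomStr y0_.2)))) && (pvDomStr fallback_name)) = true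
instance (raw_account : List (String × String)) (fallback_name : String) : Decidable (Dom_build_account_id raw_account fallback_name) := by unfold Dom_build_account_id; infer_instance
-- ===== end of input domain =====

-- B replaces A's dash-substitution + '--'-collapsing while loop + strip('-') by tokenizing the
-- seed into its maximal alnum runs (itertools.groupby) and joining them with '-'; same return value.

-- ===== PORT A =====
-- pvReplaceDD is the spec of one pass of collapsed.replace("--", "-"); it and the lemmas up to
-- pvReplaceDD_length_lt exist only so that pvCollapse (the port of A's while loop) can cite them
-- for termination (each replace pass strictly shrinks the string while "--" occurs in it).
def pvReplaceDD : List Char → List Char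
  | '-' :: '-' :: t => '-' :: pvReplaceDD t
  | c :: t => c :: pvReplaceDD t
  | [] => []

theorem pvReplaceDD_cons (c : Char) (t : List Char) (h : ¬ (c = '-' ∧ t.head? = some '-')) :
    pvReplaceDD (c :: t) = c :: pvReplaceDD t := by
  rw [pvReplaceDD.eq_def]
  split
  · rename_i heq; injection heq with h1 h2; subst h1 h2; simp at h
  · rename_i heq; injection heq with h1 h2; subst h1 h2; rfl
  · rename_i heq; cases heq

theorem pvGo_eq (fuel : Nat) (l acc : List Char) (h : l.length ≤ fuel) :
    PySem.Chars.replace.go ['-', '-'] ['-'] fuel l acc = acc.reverse ++ pvReplaceDD l := by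
  induction fuel generalizing l acc with
  | zero =>
    have : l = [] := by cases l <;> simp_all
    subst this; simp [PySem.Chars.replace.go, pvReplaceDD]
  | succ n ih =>
    match l with
    | [] => simp [PySem.Chars.replace.go, pvReplaceDD]
    | c :: t =>
      rw [PySem.Chars.replace.go]
      by_cases hp : List.isPrefixOf ['-', '-'] (c :: t)
      · have hc : c = '-' ∧ ∃ t', t = '-' :: t' := by
          cases t with
          | nil => simp [List.isPrefixOf] at hp
          | cons d t' =>
            simp [List.isPrefixOf] at hp
            exact ⟨hp.1.symm, t', by rw [hp.2]⟩
        obtain ⟨hc1, t', ht⟩ := hc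
        subst hc1 ht
        simp only [hp, if_true, List.length_cons, List.drop_succ_cons, List.drop_zero,
          List.length_nil, List.drop]
        rw [ih t' _ (by simp at h ⊢; omega)]
        simp [pvReplaceDD]
      · simp only [hp, if_false]
        rw [ih t _ (by simp at h ⊢; omega)]
        rw [pvReplaceDD_cons]
        · simp
        · rintro ⟨hc, ht⟩
          subst hc
          cases t with
          | nil => simp at ht
          | cons d t' => simp at ht; subst ht; simp [List.isPrefixOf] at hp

theorem pvReplaceDD_length_le (cs : List Char) : (pvReplaceDD cs).length ≤ cs.length := by
  fun_induction pvReplaceDD cs <;> simp_all <;> omega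

theorem pvReplace_eq (cs : List Char) :
    PySem.Chars.replace cs ['-', '-'] ['-'] = pvReplaceDD cs := by
  rw [PySem.Chars.replace]
  simp only [List.isEmpty_cons, Bool.false_eq_true, if_false]
  simpa using pvGo_eq cs.length cs [] le_rfl

theorem pvReplaceDD_length_lt (cs : List Char) (h : ['-', '-'] <:+: cs) :
    (pvReplaceDD cs).length < cs.length := by
  fun_induction pvReplaceDD cs with
  | case1 t ih =>
    have := pvReplaceDD_length_le t
    simp; omega
  | case2 c t hguard ih =>
    rcases (List.infix_cons_iff.mp h) with hpre | hinf
    · exfalso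
      rcases hpre with ⟨s, hs⟩
      cases t with
      | nil => simp at hs
      | cons d t' =>
        injection hs with h1 h2; injection h2 with h3 h4
        exact hguard t' h1.symm (by rw [h3])
    · have := ih hinf; simp; omega
  | case3 => simp at h

def pvCollapse (cs : List Char) : List Char :=
  if PySem.Chars.isIn ['-', '-'] cs then pvCollapse (PySem.Chars.replace cs ['-', '-'] ['-']) else cs
  termination_by cs.length
  decreasing_by
    rw [pvReplace_eq]
    exact pvReplaceDD_length_lt cs ((PySem.Chars.isIn_iff_infix _ _).mp (by assumption))

def build_account_id (raw_account : List (String × String)) (fallback_name : String) : String :=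
  let explicit := PySem.Str.strip (PySem.Dict.getD (PySem.Dict.mk raw_account) "id" "")
  if explicit = "" then
    let seed := PySem.Str.lower (PySem.Str.strip fallback_name)
    let seed := if seed = "" then "sub-account" else seed
    let allowed := seed.toList.map (fun c => if PySem.Chars.isalnum c then c else '-')
    let collapsed := pvCollapse allowed
    let res := PySem.Chars.stripChars collapsed ['-']
    if res = [] then "sub-account" else String.ofList res
  else explicit

-- ===== PORT B =====
-- maximal runs of alnum chars, in order (the True groups of itertools.groupby(seed, str.isalnum))
def pvRuns : List Char → List (List Char)
  | [] => []
  | c :: t =>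
    if PySem.Chars.isalnum c then
      (c :: t.takeWhile PySem.Chars.isalnum) :: pvRuns (t.dropWhile PySem.Chars.isalnum)
    else pvRuns t
  termination_by cs => cs.length
  decreasing_by
    · have := (List.dropWhile_sublist (l := t) (p := PySem.Chars.isalnum)).length_le
      simp; omega
    · simp

def build_account_id_alt (raw_account : List (String × String)) (fallback_name : String) : String :=
  let explicit := PySem.Str.strip (PySem.Dict.getD (PySem.Dict.mk raw_account) "id" "")
  if explicit = "" then
    let seed := PySem.Str.lower (PySem.Str.strip fallback_name)
    let seed := if seed = "" then "sub-account" else seed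
    let slug := PySem.Chars.join ['-'] (pvRuns seed.toList)
    if slug = [] then "sub-account" else String.ofList slug
  else explicit

-- ===== PRECONDITION & SPEC =====
def Spec_build_account_id (raw_account : List (String × String)) (fallback_name : String) (out : String) : Prop := out = build_account_id_alt raw_account fallback_name
instance (raw_account : List (String × String)) (fallback_name : String) (out : String) : Decidable (Spec_build_account_id raw_account fallback_name out) := by unfold Spec_build_account_id; infer_instance

-- ===== CLAIM (what is proved, stated in full; the proofs are below) =====
def Claim_equal_build_account_id : Prop := ∀ (raw_account : List (String × String)) (fallback_name : String), Dom_build_account_id raw_account fallback_name → Spec_build_account_id raw_account fallback_name (build_account_id raw_account fallback_name)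

-- ===== LEMMAS AND PROOFS =====

-- the fixpoint of A's '--'-collapsing while loop: every maximal dash run becomes one dash
def pvSqueeze : List Char → List Char
  | '-' :: '-' :: t => pvSqueeze ('-' :: t)
  | c :: t => c :: pvSqueeze t
  | [] => []

theorem pvSqueeze_cons (c : Char) (x : List Char) :
    pvSqueeze (c :: x) = if c = '-' ∧ x.head? = some '-' then pvSqueeze x else c :: pvSqueeze x := by
  rw [pvSqueeze.eq_def]
  split
  · rename_i heq; injection heq with h1 h2; subst h1 h2; simp
  · rename_i x' c' t hguard heq; injection heq with h1 h2; subst h1 h2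
    have : ¬ (c = '-' ∧ x.head? = some '-') := by
      rintro ⟨hc, hh⟩
      subst hc
      cases x with
      | nil => simp at hh
      | cons d t' => simp at hh; subst hh; exact hguard t' rfl rfl
    simp [this]
  · rename_i heq; cases heq

theorem pvReplaceDD_head? (cs : List Char) : (pvReplaceDD cs).head? = cs.head? := by
  fun_induction pvReplaceDD cs <;> simp

theorem pvSqueeze_replaceDD (cs : List Char) : pvSqueeze (pvReplaceDD cs) = pvSqueeze cs := by
  fun_induction pvReplaceDD cs with
  | case1 t ih =>
    rw [pvSqueeze_cons, pvReplaceDD_head?]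
    have h2 : pvSqueeze ('-' :: '-' :: t) = pvSqueeze ('-' :: t) := by rw [pvSqueeze]
    rw [h2, pvSqueeze_cons, ih]
  | case2 c t hguard ih =>
    rw [pvSqueeze_cons, pvReplaceDD_head?, pvSqueeze_cons, ih]
  | case3 => rfl

theorem pvSqueeze_noDD (cs : List Char) (h : ¬ ['-', '-'] <:+: cs) : pvSqueeze cs = cs := by
  fun_induction pvSqueeze cs with
  | case1 t ih => exact absurd ⟨[], t, rfl⟩ h
  | case2 c t hguard ih =>
    rw [ih (fun hinf => h (hinf.trans (List.suffix_cons c t).isInfix))]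
  | case3 => rfl

theorem pvCollapse_eq (cs : List Char) : pvCollapse cs = pvSqueeze cs := by
  fun_induction pvCollapse cs with
  | case1 cs hin ih =>
    rw [ih, pvReplace_eq, pvSqueeze_replaceDD]
  | case2 cs hin =>
    rw [pvSqueeze_noDD cs ((PySem.Chars.isIn_eq_false_iff _ _).mp (by simpa using hin))]

def pvHeadBad : List Char → Bool
  | [] => false
  | c :: _ => !PySem.Chars.isalnum c

def pvLastBad : List Char → Bool
  | [] => false
  | [c] => !PySem.Chars.isalnum c
  | _ :: c :: t => pvLastBad (c :: t)

theorem pvAlnum_ne_dash (c : Char) (h : PySem.Chars.isalnum c = true) : c ≠ '-' := by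
  rintro rfl
  have : PySem.Chars.isalnum '-' = false := by decide
  simp [this] at h

theorem pvJoin_cons_run (c : Char) (r : List Char) (L : List (List Char)) :
    PySem.Chars.join ['-'] ((c :: r) :: L) = c :: PySem.Chars.join ['-'] (r :: L) := by
  cases L with
  | nil => simp [PySem.Chars.join_singleton]
  | cons q L' => simp [PySem.Chars.join_cons_cons]

theorem pvJoin_cons (r : List Char) (L : List (List Char)) :
    PySem.Chars.join ['-'] (r :: L) = r ++ (if L = [] then [] else '-' :: PySem.Chars.join ['-'] L) := by
  cases L with
  | nil => simp [PySem.Chars.join_singleton]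
  | cons q L' => simp [PySem.Chars.join_cons_cons]

theorem pvLastBad_cons (c : Char) (t : List Char) (h : t ≠ []) :
    pvLastBad (c :: t) = pvLastBad t := by
  cases t with
  | nil => simp at h
  | cons d t' => rfl

theorem pvRuns_nil_iff (t : List Char) : pvRuns t = [] ↔ ∀ x ∈ t, PySem.Chars.isalnum x = false := by
  fun_induction pvRuns t with
  | case1 => simp
  | case2 c t hc ih => simp [hc]
  | case3 c t hc ih => simp [Bool.not_eq_true] at hc; simp [ih, hc]

theorem pvLastBad_of_all (t : List Char) (h : ∀ x ∈ t, PySem.Chars.isalnum x = false) (hne : t ≠ []) :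
    pvLastBad t = true := by
  induction t with
  | nil => simp at hne
  | cons c t' ih =>
    cases t' with
    | nil => simp [pvLastBad, h c (by simp)]
    | cons d t'' =>
      rw [pvLastBad_cons _ _ (by simp)]
      exact ih (fun x hx => h x (List.mem_cons_of_mem c hx)) (by simp)

theorem pvP (cs : List Char) :
    pvSqueeze (cs.map (fun c => if PySem.Chars.isalnum c then c else '-')) =
      (if pvHeadBad cs then ['-'] else []) ++ PySem.Chars.join ['-'] (pvRuns cs)
        ++ (if pvRuns cs ≠ [] ∧ pvLastBad cs then ['-'] else []) := by
  induction cs with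
  | nil => simp [pvSqueeze, pvHeadBad, pvRuns, pvLastBad, PySem.Chars.join_nil]
  | cons c t ih =>
    by_cases hc : PySem.Chars.isalnum c = true
    · have hDc : (if PySem.Chars.isalnum c then c else '-') = c := by simp [hc]
      have hcnd : c ≠ '-' := pvAlnum_ne_dash c hc
      cases t with
      | nil =>
        simp only [List.map_cons, List.map_nil, hDc]
        rw [pvSqueeze_cons]
        simp [pvSqueeze, pvHeadBad, hc, pvRuns, pvLastBad, PySem.Chars.join_singleton, hcnd]
      | cons d t' =>
        by_cases hd : PySem.Chars.isalnum d = true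
        · -- run grows at the front
          simp only [List.map_cons, hDc]
          rw [pvSqueeze_cons]
          have hcond : ¬ (c = '-' ∧ (((if PySem.Chars.isalnum d then d else '-') :: t'.map (fun c => if PySem.Chars.isalnum c then c else '-')).head? = some '-')) := by
            rintro ⟨h1, _⟩; exact hcnd h1
          rw [if_neg hcond]
          have ih' := ih
          simp only [List.map_cons] at ih'
          rw [ih']
          have h1 : pvRuns (c :: d :: t') = (c :: d :: t'.takeWhile PySem.Chars.isalnum) :: pvRuns (t'.dropWhile PySem.Chars.isalnum) := by
            rw [pvRuns]; simp [hc, hd]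
          have h2 : pvRuns (d :: t') = (d :: t'.takeWhile PySem.Chars.isalnum) :: pvRuns (t'.dropWhile PySem.Chars.isalnum) := by
            rw [pvRuns]; simp [hd]
          rw [h1, h2]
          rw [pvJoin_cons_run, pvJoin_cons_run, pvJoin_cons_run]
          simp [pvHeadBad, hc, hd, pvLastBad_cons c (d :: t') (by simp)]
        · -- new singleton run [c]
          simp only [List.map_cons, hDc]
          rw [pvSqueeze_cons]
          have hcond : ¬ (c = '-' ∧ (((if PySem.Chars.isalnum d then d else '-') :: t'.map (fun c => if PySem.Chars.isalnum c then c else '-')).head? = some '-')) := by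
            rintro ⟨h1, _⟩; exact hcnd h1
          rw [if_neg hcond]
          have ih' := ih
          simp only [List.map_cons] at ih'
          rw [ih']
          have hd' : ¬ PySem.Chars.isalnum d = true := hd
          have h1 : pvRuns (c :: d :: t') = [c] :: pvRuns (d :: t') := by
            rw [pvRuns, if_pos hc, List.takeWhile_cons_of_neg hd', List.dropWhile_cons_of_neg hd']
          rw [h1, pvJoin_cons]
          by_cases hL : pvRuns (d :: t') = []
          · have hall : ∀ x ∈ d :: t', PySem.Chars.isalnum x = false := (pvRuns_nil_iff _).mp hL
            have hlb : pvLastBad (d :: t') = true := pvLastBad_of_all _ hall (by simp)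
            simp [hL, pvHeadBad, hc, hd, PySem.Chars.join_nil, pvLastBad_cons c (d :: t') (by simp), hlb]
          · simp [hL, pvHeadBad, hc, hd, pvLastBad_cons c (d :: t') (by simp)]
    · have hDc : (if PySem.Chars.isalnum c then c else '-') = '-' := by simp [hc]
      have hr : pvRuns (c :: t) = pvRuns t := by rw [pvRuns]; simp [hc]
      cases t with
      | nil =>
        simp only [List.map_cons, List.map_nil, hDc]
        rw [pvSqueeze_cons]
        simp [pvSqueeze, pvHeadBad, hc, hr, pvRuns, pvLastBad, PySem.Chars.join_nil]
      | cons d t' =>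
        by_cases hd : PySem.Chars.isalnum d = true
        · -- next char alnum: dash survives as pre
          have hDd : (if PySem.Chars.isalnum d then d else '-') = d := by simp [hd]
          simp only [List.map_cons, hDc, hDd]
          rw [pvSqueeze_cons]
          have hcond : ¬ ('-' = '-' ∧ ((d :: t'.map (fun c => if PySem.Chars.isalnum c then c else '-')).head? = some '-')) := by
            rintro ⟨_, h2⟩; simp at h2; exact pvAlnum_ne_dash d hd h2
          rw [if_neg hcond]
          have := ih
          simp only [List.map_cons, hDd] at this
          rw [this]
          simp [pvHeadBad, hc, hd, hr, pvLastBad_cons c (d :: t') (by simp)]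
        · -- next char also a dash: squeeze eats this one
          have hDd : (if PySem.Chars.isalnum d then d else '-') = '-' := by simp [hd]
          simp only [List.map_cons, hDc, hDd]
          rw [pvSqueeze_cons]
          rw [if_pos ⟨rfl, by simp⟩]
          have := ih
          simp only [List.map_cons, hDd] at this
          rw [this]
          simp [pvHeadBad, hc, hd, hr, pvLastBad_cons c (d :: t') (by simp)]

theorem pvRuns_facts (cs : List Char) :
    ∀ r ∈ pvRuns cs, r ≠ [] ∧ r.all PySem.Chars.isalnum := by
  fun_induction pvRuns cs with
  | case1 => simp
  | case2 c t hc ih =>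
    intro r hr
    rcases List.mem_cons.mp hr with rfl | hr'
    · refine ⟨by simp, ?_⟩
      simp only [List.all_cons, hc, Bool.true_and, List.all_eq_true]
      exact fun x hx => List.mem_takeWhile_imp hx
    · exact ih r hr'
  | case3 c t hc ih => exact ih

theorem pvJoin_head? (r : List Char) (rest : List (List Char)) (hr : r ≠ []) :
    (PySem.Chars.join ['-'] (r :: rest)).head? = r.head? := by
  rw [pvJoin_cons]
  exact List.head?_append_of_ne_nil _ hr

theorem pvJoin_ne_nil (r : List Char) (rest : List (List Char)) (hr : r ≠ []) :
    PySem.Chars.join ['-'] (r :: rest) ≠ [] := by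
  rw [pvJoin_cons]
  simp [hr]

theorem pvJoin_getLast? (rs : List (List Char)) (h : ∀ r ∈ rs, r ≠ []) (c : Char)
    (hc : (PySem.Chars.join ['-'] rs).getLast? = some c) : ∃ r ∈ rs, r.getLast? = some c := by
  induction rs with
  | nil => simp [PySem.Chars.join_nil] at hc
  | cons r rest ih =>
    cases rest with
    | nil =>
      rw [PySem.Chars.join_singleton] at hc
      exact ⟨r, by simp, hc⟩
    | cons q rest' =>
      rw [PySem.Chars.join_cons_cons] at hc
      have hq : PySem.Chars.join ['-'] (q :: rest') ≠ [] :=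
        pvJoin_ne_nil q rest' (h q (by simp))
      rw [List.getLast?_append_of_ne_nil _ hq] at hc
      obtain ⟨r', hr', hl⟩ := ih (fun x hx => h x (List.mem_cons_of_mem r hx)) hc
      exact ⟨r', List.mem_cons_of_mem r hr', hl⟩

theorem pvDropDash (l : List Char) (h : ∀ hd, l.head? = some hd → hd ≠ '-') :
    List.dropWhile (fun c => (['-'] : List Char).contains c) l = l := by
  cases l with
  | nil => rfl
  | cons a t =>
    rw [List.dropWhile_cons_of_neg]
    simp only [List.contains_eq_mem, List.mem_singleton, decide_eq_true_eq]
    exact h a rfl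

theorem pvStrip (p q m : List Char) (hp : p = [] ∨ p = ['-']) (hq : q = [] ∨ q = ['-'])
    (hm : ∀ hd, m.head? = some hd → hd ≠ '-') (hl : ∀ lt, m.getLast? = some lt → lt ≠ '-')
    (hmq : m = [] → q = []) :
    PySem.Chars.stripChars (p ++ m ++ q) ['-'] = m := by
  cases m with
  | nil =>
    have hq0 := hmq rfl
    subst hq0
    rcases hp with rfl | rfl <;> decide
  | cons h0 m' =>
    rw [PySem.Chars.stripChars]
    have step1 : List.dropWhile (fun c => (['-'] : List Char).contains c) (p ++ (h0 :: m') ++ q)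
        = (h0 :: m') ++ q := by
      have hhd : ∀ hd, ((h0 :: m') ++ q).head? = some hd → hd ≠ '-' := by
        intro hd hh
        rw [List.cons_append] at hh
        simp only [List.head?_cons, Option.some.injEq] at hh
        subst hh
        exact hm h0 rfl
      rcases hp with rfl | rfl
      · simp only [List.nil_append]
        exact pvDropDash _ hhd
      · rw [List.cons_append, List.cons_append, List.dropWhile_cons_of_pos (by simp)]
        simp only [List.nil_append]
        exact pvDropDash _ hhd
    rw [step1]
    have hrev : ((h0 :: m') ++ q).reverse = q.reverse ++ (h0 :: m').reverse := by
      rw [List.reverse_append]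
    rw [hrev]
    have hlast : ∀ hd, (h0 :: m').reverse.head? = some hd → hd ≠ '-' := by
      intro hd hh
      rw [List.head?_reverse] at hh
      exact hl hd hh
    have step2 : List.dropWhile (fun c => (['-'] : List Char).contains c)
        (q.reverse ++ (h0 :: m').reverse) = (h0 :: m').reverse := by
      rcases hq with rfl | rfl
      · simp only [List.reverse_nil, List.nil_append]
        exact pvDropDash _ hlast
      · show List.dropWhile _ ('-' :: (h0 :: m').reverse) = _
        rw [List.dropWhile_cons_of_pos (by simp)]
        exact pvDropDash _ hlast
    rw [step2, List.reverse_reverse]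

theorem pvMain (cs : List Char) :
    PySem.Chars.stripChars
        (pvCollapse (cs.map (fun c => if PySem.Chars.isalnum c then c else '-'))) ['-']
      = PySem.Chars.join ['-'] (pvRuns cs) := by
  rw [pvCollapse_eq, pvP cs]
  apply pvStrip
  · split
    · right; rfl
    · left; rfl
  · split
    · right; rfl
    · left; rfl
  · intro hd hh
    cases hrs : pvRuns cs with
    | nil => rw [hrs, PySem.Chars.join_nil] at hh; simp at hh
    | cons r rest =>
      rw [hrs] at hh
      have hr := pvRuns_facts cs r (by rw [hrs]; simp)
      rw [pvJoin_head? r rest hr.1] at hh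
      have hmem : hd ∈ r := by
        cases r with
        | nil => simp at hh
        | cons a t => simp only [List.head?_cons, Option.some.injEq] at hh; subst hh; simp
      have halnum : PySem.Chars.isalnum hd = true := by
        have := hr.2
        rw [List.all_eq_true] at this
        exact this hd hmem
      exact pvAlnum_ne_dash hd halnum
  · intro lc hh
    cases hrs : pvRuns cs with
    | nil => rw [hrs, PySem.Chars.join_nil] at hh; simp at hh
    | cons r rest =>
      rw [hrs] at hh
      obtain ⟨r', hr', hl'⟩ := pvJoin_getLast? (r :: rest)
        (fun x hx => (pvRuns_facts cs x (by rw [hrs]; exact hx)).1) lc hh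
      have hfacts := pvRuns_facts cs r' (by rw [hrs]; exact hr')
      have hmem : lc ∈ r' := List.mem_of_getLast? hl'
      have halnum : PySem.Chars.isalnum lc = true := by
        have := hfacts.2
        rw [List.all_eq_true] at this
        exact this lc hmem
      exact pvAlnum_ne_dash lc halnum
  · intro hm0
    cases hrs : pvRuns cs with
    | nil => simp [hrs]
    | cons r rest =>
      rw [hrs] at hm0
      exact absurd hm0 (pvJoin_ne_nil r rest (pvRuns_facts cs r (by rw [hrs]; simp)).1)

-- ===== VERDICT (by name: the statement is the Claim_ definition above) =====
theorem build_account_id_spec : Claim_equal_build_account_id := by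
  intro raw fb _
  unfold Spec_build_account_id build_account_id build_account_id_alt
  simp only [pvMain]
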